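-- pv_equiv track=rewrite | github.com/maxlou05/CMIMC-2020 | scotty_dog.py | count
-- ===== SOURCE A (Python) =====
-- def count(board, mode, x, y):
--     blockades = 0
--     # Check up
--     if x < 0 or x > 14 or y < 0 or y > 14:
--         return 0
--     if mode == 'u':
--         for i in range(y+1, 15):
--             for j in range(15):
--                 if board[i][j] > 1:
--                     blockades += 1
--     # Check down
--     elif mode == 'd':
--         for i in range(0, y):
--             for j in range(15):
--                 if board[i][j] > 1:
--                     blockades += 1
--     # Check left
--     elif mode == 'l':
--         for i in range(15):
--             for j in range(0, x):
--                 if board[i][j] > 1: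
--                     blockades += 1
--     # Check right
--     elif mode == 'r':
--         for i in range(15):
--             for j in range(x+1, 15):
--                 if board[i][j] > 1:
--                     blockades += 1
--     # Check around
--     elif mode == 'o':
--         xl = x-1
--         xh = x+2
--         yl = y-1
--         yh = y+2
--         if yl < 0:
--             yl = y
--         if yh > 15:
--             yh = y+1
--         if xl < 0:
--             xl = x
--         if xh > 15:
--             xh = x+1
--         for i in range(yl, yh):
--             for j in range(xl, xh):
--                 if board[i][j] > 1:
--                     blockades += 1
--     return blockades
-- ===== SOURCE B (Python) =====
-- def count(board, mode, x, y):
--     if x < 0 or x > 14 or y < 0 or y > 14: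
--         return 0
--     if mode == 'u':
--         r0, r1, c0, c1 = y + 1, 15, 0, 15
--     elif mode == 'd':
--         r0, r1, c0, c1 = 0, y, 0, 15
--     elif mode == 'l':
--         r0, r1, c0, c1 = 0, 15, 0, x
--     elif mode == 'r':
--         r0, r1, c0, c1 = 0, 15, x + 1, 15
--     elif mode == 'o':
--         r0 = y - 1 if y - 1 >= 0 else y
--         r1 = y + 2 if y + 2 <= 15 else y + 1
--         c0 = x - 1 if x - 1 >= 0 else x
--         c1 = x + 2 if x + 2 <= 15 else x + 1
--     else:
--         return 0
--     # 2D prefix-sum table of heavy-cell flags: S[i][j] = #heavy cells in rows < i, cols < j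
--     S = [[0] * 16]
--     for i in range(15):
--         prev = S[-1]
--         row = board[i]
--         cur = [0]
--         for j in range(15):
--             cur.append(prev[j + 1] + cur[j] - prev[j] + (1 if row[j] > 1 else 0))
--         S.append(cur)
--     return S[r1][c1] - S[r0][c1] - S[r1][c0] + S[r0][c0]
-- ===== Notes on version B (the rewrite author's own statement) =====
-- stated objective: alternative
-- what changed: A counts heavy cells by running nested index loops over the selected region; B instead builds a 16x16 2D prefix-sum table of heavy-cell flags once and answers the region as a single inclusion-exclusion rectangle query S[r1][c1]-S[r0][c1]-S[r1][c0]+S[r0][c0].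
-- outside the precondition, e.g. on count([], 'u', 0, 14): A returns 0, B raises IndexError; on count([[0]], 'd', 3, 0): A returns 0, B raises IndexError
import Mathlib
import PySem

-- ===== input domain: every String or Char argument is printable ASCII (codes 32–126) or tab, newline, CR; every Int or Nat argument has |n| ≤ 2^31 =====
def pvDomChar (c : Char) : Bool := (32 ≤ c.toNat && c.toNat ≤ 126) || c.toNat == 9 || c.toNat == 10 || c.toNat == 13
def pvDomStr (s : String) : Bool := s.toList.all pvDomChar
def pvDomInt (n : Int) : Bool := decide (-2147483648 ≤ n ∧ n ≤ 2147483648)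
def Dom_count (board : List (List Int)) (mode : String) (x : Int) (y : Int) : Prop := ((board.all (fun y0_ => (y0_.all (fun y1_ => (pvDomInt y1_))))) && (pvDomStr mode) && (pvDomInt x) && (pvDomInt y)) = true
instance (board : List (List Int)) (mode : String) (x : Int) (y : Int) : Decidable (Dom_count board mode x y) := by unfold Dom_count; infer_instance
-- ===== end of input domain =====

-- B replaces A's per-mode nested counting loops by a 16x16 2D prefix-sum table of
-- heavy-cell flags answered with one inclusion-exclusion rectangle query
-- (objective: alternative algorithm/data structure; same order of cost).

-- ===== PORT A =====
def count (board : List (List Int)) (mode : String) (x : Int) (y : Int) : Int :=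
  if x < 0 ∨ x > 14 ∨ y < 0 ∨ y > 14 then 0
  else if mode = "u" then
    (PySem.List.pyRange (y + 1) 15 1).foldl (fun b i =>
      (PySem.List.pyRange 0 15 1).foldl (fun b j =>
        if PySem.List.pyGetD (PySem.List.pyGetD board i []) j 0 > 1 then b + 1 else b) b) 0
  else if mode = "d" then
    (PySem.List.pyRange 0 y 1).foldl (fun b i =>
      (PySem.List.pyRange 0 15 1).foldl (fun b j =>
        if PySem.List.pyGetD (PySem.List.pyGetD board i []) j 0 > 1 then b + 1 else b) b) 0
  else if mode = "l" then
    (PySem.List.pyRange 0 15 1).foldl (fun b i =>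
      (PySem.List.pyRange 0 x 1).foldl (fun b j =>
        if PySem.List.pyGetD (PySem.List.pyGetD board i []) j 0 > 1 then b + 1 else b) b) 0
  else if mode = "r" then
    (PySem.List.pyRange 0 15 1).foldl (fun b i =>
      (PySem.List.pyRange (x + 1) 15 1).foldl (fun b j =>
        if PySem.List.pyGetD (PySem.List.pyGetD board i []) j 0 > 1 then b + 1 else b) b) 0
  else if mode = "o" then
    let xl := x - 1
    let xh := x + 2
    let yl := y - 1
    let yh := y + 2
    let yl := if yl < 0 then y else yl
    let yh := if yh > 15 then y + 1 else yh
    let xl := if xl < 0 then x else xl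
    let xh := if xh > 15 then x + 1 else xh
    (PySem.List.pyRange yl yh 1).foldl (fun b i =>
      (PySem.List.pyRange xl xh 1).foldl (fun b j =>
        if PySem.List.pyGetD (PySem.List.pyGetD board i []) j 0 > 1 then b + 1 else b) b) 0
  else 0

-- ===== PORT B =====
-- inner loop of Source B: extend the previous prefix row 'prev' to the next one
def buildRow (prev : List Int) (rowB : List Int) : List Int :=
  (PySem.List.pyRange 0 15 1).foldl (fun cur j =>
    cur ++ [PySem.List.pyGetD prev (j + 1) 0 + PySem.List.pyGetD cur j 0
            - PySem.List.pyGetD prev j 0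
            + (if PySem.List.pyGetD rowB j 0 > 1 then 1 else 0)]) [0]

-- outer loop of Source B: the full 16x16 prefix-sum table S
def buildS (board : List (List Int)) : List (List Int) :=
  (PySem.List.pyRange 0 15 1).foldl (fun S i =>
    S ++ [buildRow (PySem.List.pyGetD S (-1) []) (PySem.List.pyGetD board i [])])
    [List.replicate 16 (0 : Int)]

def count_alt (board : List (List Int)) (mode : String) (x : Int) (y : Int) : Int :=
  if x < 0 ∨ x > 14 ∨ y < 0 ∨ y > 14 then 0
  else
    let bounds : Option (Int × Int × Int × Int) :=
      if mode = "u" then some (y + 1, 15, 0, 15)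
      else if mode = "d" then some (0, y, 0, 15)
      else if mode = "l" then some (0, 15, 0, x)
      else if mode = "r" then some (0, 15, x + 1, 15)
      else if mode = "o" then
        some (if y - 1 ≥ 0 then y - 1 else y,
              if y + 2 ≤ 15 then y + 2 else y + 1,
              if x - 1 ≥ 0 then x - 1 else x,
              if x + 2 ≤ 15 then x + 2 else x + 1)
      else none
    match bounds with
    | none => 0
    | some (r0, r1, c0, c1) =>
      let S := buildS board
      PySem.List.pyGetD (PySem.List.pyGetD S r1 []) c1 0
        - PySem.List.pyGetD (PySem.List.pyGetD S r0 []) c1 0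
        - PySem.List.pyGetD (PySem.List.pyGetD S r1 []) c0 0
        + PySem.List.pyGetD (PySem.List.pyGetD S r0 []) c0 0

-- ===== PRECONDITION & SPEC =====
-- Pre_ excludes boards smaller than 15x15 when the coordinates are in range and the mode is
-- recognized: there B's prefix-table pass always reads all 15x15 cells and raises IndexError,
-- while A raises too unless the selected region happens to be empty (then A returns 0).
def Pre_count (board : List (List Int)) (mode : String) (x : Int) (y : Int) : Prop :=
  (0 ≤ x ∧ x ≤ 14 ∧ 0 ≤ y ∧ y ≤ 14) →
  (mode = "u" ∨ mode = "d" ∨ mode = "l" ∨ mode = "r" ∨ mode = "o") →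
  (15 ≤ board.length ∧ ∀ r ∈ board, 15 ≤ r.length)
instance (board : List (List Int)) (mode : String) (x : Int) (y : Int) : Decidable (Pre_count board mode x y) := by unfold Pre_count; infer_instance

def pvWitness_count : List (List Int) × String × Int × Int :=
  (List.replicate 15 (List.replicate 15 (0 : Int)), "o", 3, 3)

def Spec_count (board : List (List Int)) (mode : String) (x : Int) (y : Int) (out : Int) : Prop := out = count_alt board mode x y
instance (board : List (List Int)) (mode : String) (x : Int) (y : Int) (out : Int) : Decidable (Spec_count board mode x y out) := by unfold Spec_count; infer_instance

-- ===== CLAIM (what is proved, stated in full; the proofs are below) =====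
def Claim_equal_count : Prop := ∀ (board : List (List Int)) (mode : String) (x : Int) (y : Int), Dom_count board mode x y → Pre_count board mode x y → Spec_count board mode x y (count board mode x y)

-- ===== LEMMAS AND PROOFS =====

-- number of heavy cells among the first j entries of a row
def cnt (row : List Int) (j : Nat) : Int := ((row.take j).countP (fun v => decide (v > 1)) : Int)

-- number of heavy cells in rows < i, columns < j
def Pfx (board : List (List Int)) (i j : Nat) : Int := ((board.take i).map (fun row => cnt row j)).sum

lemma cnt_succ (row : List Int) (k : Nat) (hk : k < row.length) :
    cnt row (k + 1) = cnt row k + (if PySem.List.pyGetD row (k : Int) 0 > 1 then 1 else 0) := by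
  rw [PySem.List.pyGetD_eq_getElem row 0 (by omega) (by exact_mod_cast hk)]
  simp only [cnt, List.take_add_one, List.getElem?_eq_getElem hk, List.countP_append,
    Int.toNat_natCast]
  by_cases h : row[k] > 1 <;> simp [h]

lemma buildRow_fold (rowB : List Int) (g : Nat → Int) (hg0 : g 0 = 0)
    (hlen : 15 ≤ rowB.length) :
    ∀ k : Nat, k ≤ 15 →
    (PySem.List.pyRange 0 (k : Int) 1).foldl (fun cur j =>
        cur ++ [PySem.List.pyGetD ((List.range 16).map g) (j + 1) 0
          + PySem.List.pyGetD cur j 0 - PySem.List.pyGetD ((List.range 16).map g) j 0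
          + (if PySem.List.pyGetD rowB j 0 > 1 then 1 else 0)]) [0]
      = (List.range (k + 1)).map (fun j => g j + cnt rowB j) := by
  intro k
  induction k with
  | zero =>
    intro _
    rw [PySem.List.pyRange_one_eq_nil (by omega)]
    simp [cnt, hg0]
  | succ k ih =>
    intro hk
    have hcast : ((k + 1 : Nat) : Int) = (k : Int) + 1 := by push_cast; ring
    rw [hcast, PySem.List.pyRange_one_succ_right (by omega), List.foldl_append, ih (by omega)]
    simp only [List.foldl_cons, List.foldl_nil]
    have e1 : PySem.List.pyGetD ((List.range 16).map g) ((k : Int) + 1) 0 = g (k + 1) := by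
      rw [← hcast, PySem.List.pyGetD_natCast]
      simp [List.getD_eq_getElem?_getD, List.getElem?_range (show k + 1 < 16 by omega)]
    have e2 : PySem.List.pyGetD ((List.range (k + 1)).map (fun j => g j + cnt rowB j)) (k : Int) 0
        = g k + cnt rowB k := by
      rw [PySem.List.pyGetD_natCast]
      simp [List.getD_eq_getElem?_getD]
    have e3 : PySem.List.pyGetD ((List.range 16).map g) (k : Int) 0 = g k := by
      rw [PySem.List.pyGetD_natCast]
      simp [List.getD_eq_getElem?_getD, List.getElem?_range (show k < 16 by omega)]
    rw [e1, e2, e3, List.range_succ (n := k + 1), List.map_append]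
    congr 1
    simp only [List.map_cons, List.map_nil]
    congr 1
    rw [cnt_succ rowB k (by omega)]
    ring

lemma buildRow_char (rowB : List Int) (g : Nat → Int) (hg0 : g 0 = 0)
    (hlen : 15 ≤ rowB.length) :
    buildRow ((List.range 16).map g) rowB = (List.range 16).map (fun j => g j + cnt rowB j) := by
  have h := buildRow_fold rowB g hg0 hlen 15 (by omega)
  unfold buildRow
  norm_num at h ⊢
  exact h

lemma Pfx_succ (board : List (List Int)) (k j : Nat) (hk : k < board.length) :
    Pfx board (k + 1) j = Pfx board k j + cnt board[k] j := by
  unfold Pfx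
  rw [List.take_add_one, List.getElem?_eq_getElem hk]
  simp only [Option.toList_some, List.map_append, List.map_cons, List.map_nil,
    List.sum_append, List.sum_cons, List.sum_nil, add_zero]

lemma buildS_char (board : List (List Int)) (hb : 15 ≤ board.length)
    (hr : ∀ r ∈ board, 15 ≤ r.length) :
    buildS board = (List.range 16).map (fun i => (List.range 16).map (fun j => Pfx board i j)) := by
  have key : ∀ k : Nat, k ≤ 15 →
      (PySem.List.pyRange 0 (k : Int) 1).foldl (fun S i =>
        S ++ [buildRow (PySem.List.pyGetD S (-1) []) (PySem.List.pyGetD board i [])])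
        [List.replicate 16 (0 : Int)]
      = (List.range (k + 1)).map (fun i => (List.range 16).map (fun j => Pfx board i j)) := by
    intro k
    induction k with
    | zero =>
      intro _
      rw [PySem.List.pyRange_one_eq_nil (by omega)]
      simp [Pfx, List.map_const']
    | succ k ih =>
      intro hk
      have hcast : ((k + 1 : Nat) : Int) = (k : Int) + 1 := by push_cast; ring
      rw [hcast, PySem.List.pyRange_one_succ_right (by omega), List.foldl_append, ih (by omega)]
      simp only [List.foldl_cons, List.foldl_nil]
      have hlen1 : ((List.range (k + 1)).map (fun i => (List.range 16).map (fun j => Pfx board i j))).length = k + 1 := by simp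
      have elast : PySem.List.pyGetD ((List.range (k + 1)).map (fun i => (List.range 16).map (fun j => Pfx board i j))) (-1) []
          = (List.range 16).map (fun j => Pfx board k j) := by
        have h1 := PySem.List.pyGetD_neg_natCast ((List.range (k + 1)).map (fun i => (List.range 16).map (fun j => Pfx board i j))) ([] : List Int) (k := 1) (by omega) (by rw [hlen1]; omega)
        norm_num at h1
        rw [h1]
      have eboard : PySem.List.pyGetD board (k : Int) [] = board[k] :=
        PySem.List.pyGetD_eq_getElem board [] (by omega) (by push_cast; omega)
      rw [elast, eboard,
          buildRow_char board[k] (fun j => Pfx board k j) (by simp [Pfx, cnt]) (hr _ (List.getElem_mem _)),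
          List.range_succ (n := k + 1), List.map_append]
      congr 1
      simp only [List.map_cons, List.map_nil]
      congr 1
      exact List.map_congr_left (fun j _ => (Pfx_succ board k j (by omega)).symm)
  have h := key 15 (by omega)
  unfold buildS
  norm_num at h ⊢
  exact h

lemma Sget (board : List (List Int)) (hb : 15 ≤ board.length)
    (hr : ∀ r ∈ board, 15 ≤ r.length) (r c : Int)
    (hr0 : 0 ≤ r) (hr15 : r ≤ 15) (hc0 : 0 ≤ c) (hc15 : c ≤ 15) :
    PySem.List.pyGetD (PySem.List.pyGetD (buildS board) r []) c 0 = Pfx board r.toNat c.toNat := by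
  rw [buildS_char board hb hr]
  rw [PySem.List.pyGetD_eq_getElem _ [] hr0 (by simp; omega)]
  rw [List.getElem_map, List.getElem_range]
  rw [PySem.List.pyGetD_eq_getElem _ 0 hc0 (by simp; omega)]
  rw [List.getElem_map, List.getElem_range]

lemma foldl_get_slice {α : Type} (xs : List α) (d : α) (g : α → Int) (a b acc : Int)
    (h0 : 0 ≤ a) (hb0 : 0 ≤ b) (hb : b ≤ (xs.length : Int)) :
    (PySem.List.pyRange a b 1).foldl (fun s i => s + g (PySem.List.pyGetD xs i d)) acc
      = acc + ((PySem.List.slice xs (some a) (some b)).map g).sum := by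
  have hlen : ((xs.take b.toNat).length : Int) = b := by
    simp [List.length_take]; omega
  have hcg : ∀ (s : Int), ∀ i ∈ PySem.List.pyRange a b 1,
      s + g (PySem.List.pyGetD xs i d) = s + g (PySem.List.pyGetD (xs.take b.toNat) i d) := by
    intro s i hi
    rw [PySem.List.mem_pyRange_one] at hi
    rw [PySem.List.pyGetD_eq_getElem xs d (by omega) (by omega),
        PySem.List.pyGetD_eq_getElem (xs.take b.toNat) d (by omega) (by omega)]
    simp [List.getElem_take]
  rw [PySem.List.foldl_congr_mem _ _ _ _ hcg]
  have key := PySem.List.foldl_pyRange_pyGetD' (xs.take b.toNat) d (fun s v => s + g v) acc h0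
  rw [hlen] at key
  rw [key, PySem.List.foldl_add]
  congr 2
  rw [PySem.List.slice_toNat xs h0 hb0, List.drop_take]

lemma row_loop (row : List Int) (c0 c1 acc : Int)
    (h0 : 0 ≤ c0) (h1 : 0 ≤ c1) (h2 : c1 ≤ (row.length : Int)) :
    (PySem.List.pyRange c0 c1 1).foldl (fun b j =>
        if PySem.List.pyGetD row j 0 > 1 then b + 1 else b) acc
      = acc + (((PySem.List.slice row (some c0) (some c1)).countP
          (fun v => decide (v > 1)) : Nat) : Int) := by
  have hcg : ∀ (b : Int), ∀ j ∈ PySem.List.pyRange c0 c1 1,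
      (if PySem.List.pyGetD row j 0 > 1 then b + 1 else b)
        = b + (fun v => if v > 1 then (1 : Int) else 0) (PySem.List.pyGetD row j 0) := by
    intro b j _; by_cases h : PySem.List.pyGetD row j 0 > 1 <;> simp [h]
  rw [PySem.List.foldl_congr_mem _ _ _ _ hcg,
      foldl_get_slice row 0 (fun v => if v > 1 then (1 : Int) else 0) c0 c1 acc h0 h1 h2]
  congr 1
  have := PySem.List.sum_map_ite_one_zero (fun v => decide (v > 1)) (PySem.List.slice row (some c0) (some c1))
  simpa using this

lemma rect_eq (board : List (List Int)) (r0 r1 c0 c1 : Int)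
    (hr0 : 0 ≤ r0) (hr1 : 0 ≤ r1) (hrb : r1 ≤ (board.length : Int))
    (hc0 : 0 ≤ c0) (hc1 : 0 ≤ c1) (hcols : ∀ r ∈ board, c1 ≤ (r.length : Int)) :
    (PySem.List.pyRange r0 r1 1).foldl (fun b i =>
        (PySem.List.pyRange c0 c1 1).foldl (fun b j =>
          if PySem.List.pyGetD (PySem.List.pyGetD board i []) j 0 > 1 then b + 1 else b) b) 0
      = ((PySem.List.slice board (some r0) (some r1)).map
          (fun row => (((PySem.List.slice row (some c0) (some c1)).countP
              (fun v => decide (v > 1)) : Nat) : Int))).sum := by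
  have hcg : ∀ (b : Int), ∀ i ∈ PySem.List.pyRange r0 r1 1,
      (PySem.List.pyRange c0 c1 1).foldl (fun b j =>
          if PySem.List.pyGetD (PySem.List.pyGetD board i []) j 0 > 1 then b + 1 else b) b
        = b + (fun row => (((PySem.List.slice row (some c0) (some c1)).countP
            (fun v => decide (v > 1)) : Nat) : Int)) (PySem.List.pyGetD board i []) := by
    intro b i hi
    rw [PySem.List.mem_pyRange_one] at hi
    have hmem : PySem.List.pyGetD board i [] ∈ board :=
      PySem.List.pyGetD_mem board [] ⟨by omega, by omega⟩
    exact row_loop _ c0 c1 b hc0 hc1 (hcols _ hmem)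
  rw [PySem.List.foldl_congr_mem _ _ _ _ hcg,
      foldl_get_slice board [] (fun row => (((PySem.List.slice row (some c0) (some c1)).countP
        (fun v => decide (v > 1)) : Nat) : Int)) r0 r1 0 hr0 hr1 hrb, zero_add]

lemma countP_slice (row : List Int) (c0 c1 : Int)
    (h0 : 0 ≤ c0) (h01 : c0 ≤ c1) (hlen : c1 ≤ (row.length : Int)) :
    (((PySem.List.slice row (some c0) (some c1)).countP (fun v => decide (v > 1)) : Nat) : Int)
      = cnt row c1.toNat - cnt row c0.toNat := by
  have hsplit : row.take c1.toNat = row.take c0.toNat ++ (row.drop c0.toNat).take (c1.toNat - c0.toNat) := by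
    rw [← List.take_add]
    congr 1
    omega
  rw [PySem.List.slice_toNat row h0 (by omega)]
  unfold cnt
  rw [hsplit, List.countP_append]
  push_cast
  ring

lemma sum_slice_rows (board : List (List Int)) (r0 r1 : Int) (g : List Int → Int)
    (h0 : 0 ≤ r0) (h01 : r0 ≤ r1) (hlen : r1 ≤ (board.length : Int)) :
    ((PySem.List.slice board (some r0) (some r1)).map g).sum
      = ((board.take r1.toNat).map g).sum - ((board.take r0.toNat).map g).sum := by
  have hsplit : board.take r1.toNat = board.take r0.toNat ++ (board.drop r0.toNat).take (r1.toNat - r0.toNat) := by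
    rw [← List.take_add]; congr 1; omega
  rw [PySem.List.slice_toNat board h0 (by omega), hsplit, List.map_append, List.sum_append]
  ring

lemma rect_query (board : List (List Int)) (r0 r1 c0 c1 : Int)
    (hb : 15 ≤ board.length) (hr : ∀ r ∈ board, 15 ≤ r.length)
    (h1 : 0 ≤ r0) (h2 : r0 ≤ r1) (h3 : r1 ≤ 15)
    (h4 : 0 ≤ c0) (h5 : c0 ≤ c1) (h6 : c1 ≤ 15) :
    (PySem.List.pyRange r0 r1 1).foldl (fun b i =>
        (PySem.List.pyRange c0 c1 1).foldl (fun b j =>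
          if PySem.List.pyGetD (PySem.List.pyGetD board i []) j 0 > 1 then b + 1 else b) b) 0
      = PySem.List.pyGetD (PySem.List.pyGetD (buildS board) r1 []) c1 0
        - PySem.List.pyGetD (PySem.List.pyGetD (buildS board) r0 []) c1 0
        - PySem.List.pyGetD (PySem.List.pyGetD (buildS board) r1 []) c0 0
        + PySem.List.pyGetD (PySem.List.pyGetD (buildS board) r0 []) c0 0 := by
  have hrb : r1 ≤ (board.length : Int) := by
    have : (15 : Int) ≤ (board.length : Int) := by exact_mod_cast hb
    omega
  have hcols : ∀ r ∈ board, c1 ≤ (r.length : Int) := by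
    intro r hrm
    have h15 : (15 : Int) ≤ (r.length : Int) := by exact_mod_cast hr r hrm
    omega
  rw [rect_eq board r0 r1 c0 c1 h1 (by omega) hrb h4 (by omega) hcols]
  have hmem : ∀ row ∈ PySem.List.slice board (some r0) (some r1), row ∈ board := by
    intro row hrow
    rw [PySem.List.slice_toNat board h1 (by omega)] at hrow
    exact List.mem_of_mem_drop (List.mem_of_mem_take hrow)
  rw [List.map_congr_left (fun row hrow =>
        countP_slice row c0 c1 h4 h5 (hcols row (hmem row hrow)))]
  rw [sum_slice_rows board r0 r1 _ h1 h2 hrb]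
  rw [Sget board hb hr r1 c1 (by omega) h3 (by omega) h6,
      Sget board hb hr r0 c1 h1 (by omega) (by omega) h6,
      Sget board hb hr r1 c0 (by omega) h3 h4 (by omega),
      Sget board hb hr r0 c0 h1 (by omega) h4 (by omega)]
  have hsub : ∀ (l : List (List Int)),
      (l.map (fun row => cnt row c1.toNat - cnt row c0.toNat)).sum
        = (l.map (fun row => cnt row c1.toNat)).sum - (l.map (fun row => cnt row c0.toNat)).sum := by
    intro l
    simp [sub_eq_add_neg, List.sum_neg, Function.comp_def]
  rw [hsub, hsub]
  unfold Pfx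
  ring

-- ===== VERDICT (by name: the statement is the Claim_ definition above) =====
theorem count_spec : Claim_equal_count := by
  intro board mode x y _ hpre
  unfold Spec_count count count_alt
  by_cases hg : x < 0 ∨ x > 14 ∨ y < 0 ∨ y > 14
  · simp [hg]
  · simp only [if_neg hg]
    have hxy : 0 ≤ x ∧ x ≤ 14 ∧ 0 ≤ y ∧ y ≤ 14 := by omega
    by_cases hu : mode = "u"
    · subst hu
      obtain ⟨hb, hr⟩ := hpre hxy (Or.inl rfl)
      simp only [String.reduceEq, reduceIte]
      exact rect_query board (y + 1) 15 0 15 hb hr (by omega) (by omega) (by omega)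
        (by omega) (by omega) (by omega)
    by_cases hd : mode = "d"
    · subst hd
      obtain ⟨hb, hr⟩ := hpre hxy (Or.inr (Or.inl rfl))
      simp only [String.reduceEq, reduceIte]
      exact rect_query board 0 y 0 15 hb hr (by omega) (by omega) (by omega)
        (by omega) (by omega) (by omega)
    by_cases hl : mode = "l"
    · subst hl
      obtain ⟨hb, hr⟩ := hpre hxy (Or.inr (Or.inr (Or.inl rfl)))
      simp only [String.reduceEq, reduceIte]
      exact rect_query board 0 15 0 x hb hr (by omega) (by omega) (by omega)
        (by omega) (by omega) (by omega)
    by_cases hr' : mode = "r"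
    · subst hr'
      obtain ⟨hb, hr⟩ := hpre hxy (Or.inr (Or.inr (Or.inr (Or.inl rfl))))
      simp only [String.reduceEq, reduceIte]
      exact rect_query board 0 15 (x + 1) 15 hb hr (by omega) (by omega) (by omega)
        (by omega) (by omega) (by omega)
    by_cases ho : mode = "o"
    · subst ho
      obtain ⟨hb, hr⟩ := hpre hxy (Or.inr (Or.inr (Or.inr (Or.inr rfl))))
      simp only [String.reduceEq, reduceIte]
      have e1 : ((if y - 1 < 0 then y else y - 1) : Int) = if y - 1 ≥ 0 then y - 1 else y := by
        split_ifs <;> omega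
      have e2 : ((if y + 2 > 15 then y + 1 else y + 2) : Int) = if y + 2 ≤ 15 then y + 2 else y + 1 := by
        split_ifs <;> omega
      have e3 : ((if x - 1 < 0 then x else x - 1) : Int) = if x - 1 ≥ 0 then x - 1 else x := by
        split_ifs <;> omega
      have e4 : ((if x + 2 > 15 then x + 1 else x + 2) : Int) = if x + 2 ≤ 15 then x + 2 else x + 1 := by
        split_ifs <;> omega
      rw [e1, e2, e3, e4]
      exact rect_query board _ _ _ _ hb hr (by split_ifs <;> omega) (by split_ifs <;> omega)
        (by split_ifs <;> omega) (by split_ifs <;> omega) (by split_ifs <;> omega)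
        (by split_ifs <;> omega)
    · simp [hu, hd, hl, hr', ho]
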